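-- pv_equiv track=rewrite | github.com/Raveriwnl/network-traffic-classification | data_collection/traffic_collector.py | infer_candidate_labels
-- ===== SOURCE A (Python) =====
-- def infer_candidate_labels(
-- 	dns_queries: set[str],
-- 	tls_snis: set[str],
-- 	http_hosts: set[str],
-- 	target_classes: list[str],
-- 	class_keywords: dict[str, list[str]],
-- ) -> list[str]:
-- 	matched: list[str] = []
-- 	haystack = " ".join(sorted(dns_queries | tls_snis | http_hosts))
-- 	for cls in target_classes:
-- 		keywords = class_keywords.get(cls, [])
-- 		if any(kw.lower() in haystack for kw in keywords):
-- 			matched.append(cls)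
-- 	return matched
-- ===== SOURCE B (Python) =====
-- def infer_candidate_labels(
-- 	dns_queries: set[str],
-- 	tls_snis: set[str],
-- 	http_hosts: set[str],
-- 	target_classes: list[str],
-- 	class_keywords: dict[str, list[str]],
-- ) -> list[str]:
-- 	haystack = " ".join(sorted(dns_queries | tls_snis | http_hosts))
-- 	need = set(target_classes)
-- 	hit = {cls for cls, kws in class_keywords.items()
-- 	       if cls in need and any(kw.lower() in haystack for kw in kws)}
-- 	return [cls for cls in target_classes if cls in hit]
-- ===== Notes on version B (the rewrite author's own statement) =====
-- stated objective: alternative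
-- what changed: Instead of looping over target_classes and, per occurrence, looking the class up in the dict and rescanning its keywords, B makes one pass over the dict items, collecting into a set the needed classes that have a matching keyword, and then filters target_classes by set membership, so each class's keywords are scanned at most once even when target_classes repeats it; the Lean-side precondition only excludes association lists with duplicate keys, which cannot arise from a Python dict.
import Mathlib
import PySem

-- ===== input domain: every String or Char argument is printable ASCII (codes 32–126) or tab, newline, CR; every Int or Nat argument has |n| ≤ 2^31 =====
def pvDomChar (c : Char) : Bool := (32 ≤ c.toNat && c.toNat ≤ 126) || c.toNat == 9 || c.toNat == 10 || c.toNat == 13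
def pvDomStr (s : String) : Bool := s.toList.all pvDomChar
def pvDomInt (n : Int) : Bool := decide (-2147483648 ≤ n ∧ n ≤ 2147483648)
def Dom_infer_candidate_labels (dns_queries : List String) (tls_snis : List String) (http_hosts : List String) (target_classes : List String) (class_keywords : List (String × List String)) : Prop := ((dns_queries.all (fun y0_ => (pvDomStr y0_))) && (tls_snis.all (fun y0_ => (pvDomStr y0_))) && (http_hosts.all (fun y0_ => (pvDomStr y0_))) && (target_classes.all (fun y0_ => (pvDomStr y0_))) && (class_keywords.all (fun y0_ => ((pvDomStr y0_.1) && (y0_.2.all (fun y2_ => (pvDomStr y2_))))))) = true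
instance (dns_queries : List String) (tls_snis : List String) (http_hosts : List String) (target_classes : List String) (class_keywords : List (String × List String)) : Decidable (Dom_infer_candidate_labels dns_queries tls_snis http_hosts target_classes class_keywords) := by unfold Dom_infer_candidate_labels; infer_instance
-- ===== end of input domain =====

-- B replaces A's per-target-class dict lookup + keyword rescan by one pass over the dict items that
-- collects the set of needed classes with a matching keyword, then a membership filter of target_classes
-- (objective: alternative; each relevant class's keywords are scanned once even if target_classes repeats it).

-- ===== PORT A =====
-- shared helper: both Pythons' line `haystack = " ".join(sorted(dns_queries | tls_snis | http_hosts))`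
def icl_haystack (dns_queries : List String) (tls_snis : List String) (http_hosts : List String) : String :=
  PySem.Str.join " " (PySem.List.sorted
    (PySem.Set.union (PySem.Set.union (PySem.Set.ofList dns_queries) tls_snis) http_hosts)
    (fun x => x))

def infer_candidate_labels (dns_queries : List String) (tls_snis : List String) (http_hosts : List String) (target_classes : List String) (class_keywords : List (String × List String)) : List String :=
  let haystack := icl_haystack dns_queries tls_snis http_hosts
  -- for cls in target_classes: keywords = class_keywords.get(cls, []); if any(kw.lower() in haystack …): matched.append(cls)
  target_classes.foldl (fun matched cls =>
    if ((PySem.Dict.mk class_keywords).getD cls []).any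
        (fun kw => PySem.Str.isIn (PySem.Str.lower kw) haystack)
    then matched ++ [cls] else matched) []

-- ===== PORT B =====
def infer_candidate_labels_alt (dns_queries : List String) (tls_snis : List String) (http_hosts : List String) (target_classes : List String) (class_keywords : List (String × List String)) : List String :=
  let haystack := icl_haystack dns_queries tls_snis http_hosts
  -- need = set(target_classes)
  let need : PySem.Set String := PySem.Set.ofList target_classes
  -- hit = {cls for cls, kws in class_keywords.items() if cls in need and any(kw.lower() in haystack for kw in kws)}
  let hit : PySem.Set String :=
    PySem.Set.ofList ((class_keywords.filter
      (fun p => PySem.Set.contains need p.1 &&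
        p.2.any (fun kw => PySem.Str.isIn (PySem.Str.lower kw) haystack))).map Prod.fst)
  -- [cls for cls in target_classes if cls in hit]
  target_classes.filter (fun cls => PySem.Set.contains hit cls)

-- ===== PRECONDITION & SPEC =====
-- Pre_ excludes association lists whose keys repeat: a Python dict can never have duplicate keys, so such
-- lists represent no Python input; on them A's first-match `.get` and B's scan of all items are both accidental.
def Pre_infer_candidate_labels (dns_queries : List String) (tls_snis : List String) (http_hosts : List String) (target_classes : List String) (class_keywords : List (String × List String)) : Prop :=
  (class_keywords.map Prod.fst).Nodup
instance (dns_queries : List String) (tls_snis : List String) (http_hosts : List String) (target_classes : List String) (class_keywords : List (String × List String)) : Decidable (Pre_infer_candidate_labels dns_queries tls_snis http_hosts target_classes class_keywords) := by unfold Pre_infer_candidate_labels; infer_instance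

def pvWitness_infer_candidate_labels : List String × List String × List String × List String × (List (String × List String)) :=
  (["ads.example.com"], ["video.net"], [], ["ads", "video", "mail"], [("ads", ["ads."]), ("video", ["video"]), ("mail", ["imap"])])

def Spec_infer_candidate_labels (dns_queries : List String) (tls_snis : List String) (http_hosts : List String) (target_classes : List String) (class_keywords : List (String × List String)) (out : List String) : Prop := out = infer_candidate_labels_alt dns_queries tls_snis http_hosts target_classes class_keywords
instance (dns_queries : List String) (tls_snis : List String) (http_hosts : List String) (target_classes : List String) (class_keywords : List (String × List String)) (out : List String) : Decidable (Spec_infer_candidate_labels dns_queries tls_snis http_hosts target_classes class_keywords out) := by unfold Spec_infer_candidate_labels; infer_instance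

-- ===== CLAIM (what is proved, stated in full; the proofs are below) =====
def Claim_equal_infer_candidate_labels : Prop := ∀ (dns_queries : List String) (tls_snis : List String) (http_hosts : List String) (target_classes : List String) (class_keywords : List (String × List String)), Dom_infer_candidate_labels dns_queries tls_snis http_hosts target_classes class_keywords → Pre_infer_candidate_labels dns_queries tls_snis http_hosts target_classes class_keywords → Spec_infer_candidate_labels dns_queries tls_snis http_hosts target_classes class_keywords (infer_candidate_labels dns_queries tls_snis http_hosts target_classes class_keywords)

-- ===== LEMMAS AND PROOFS =====

-- With distinct keys, A's "keywords of the first entry for cls match" equals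
-- "cls is a key of some matching entry" — B's membership test.
lemma icl_key (pred : String → Bool) (ck : List (String × List String)) (cls : String)
    (hnd : (ck.map Prod.fst).Nodup) :
    ((PySem.Dict.mk ck).getD cls []).any pred =
      ((ck.filter (fun p => p.2.any pred)).map Prod.fst).contains cls := by
  induction ck with
  | nil => simp [PySem.Dict.getD, PySem.Dict.get?]
  | cons p rest ih =>
    simp only [List.map_cons, List.nodup_cons, List.mem_map] at hnd
    rw [PySem.Dict.getD_eq_get?_getD, PySem.Dict.get?_mk_cons]
    by_cases h : p.1 = cls
    · subst h
      simp only [beq_self_eq_true, if_true, Option.getD_some, List.filter_cons]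
      by_cases hp : p.2.any pred = true
      · simp [hp]
      · simp only [Bool.not_eq_true] at hp
        simp only [hp, Bool.false_eq_true, if_false]
        symm
        simp only [List.contains_eq_mem, List.mem_map, List.mem_filter, decide_eq_false_iff_not,
          not_exists, not_and]
        rintro q ⟨hq, _⟩ hq1
        exact hnd.1 ⟨q, hq, hq1⟩
    · have hbeq : (p.1 == cls) = false := by simpa using h
      rw [hbeq]
      simp only [Bool.false_eq_true, if_false]
      rw [← PySem.Dict.getD_eq_get?_getD, ih hnd.2]
      simp only [List.filter_cons]
      by_cases hp : p.2.any pred = true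
      · simp [hp, List.contains_eq_mem]
        intro hc; exact absurd hc.symm h
      · simp [hp]

-- entries whose key is not cls cannot witness cls ∈ (filter …).map fst, so the two
-- filter conditions may differ off key cls
lemma icl_filter_key_congr (q r : String × List String → Bool)
    (ck : List (String × List String)) (cls : String)
    (h : ∀ p : String × List String, p.1 = cls → q p = r p) :
    ((ck.filter q).map Prod.fst).contains cls = ((ck.filter r).map Prod.fst).contains cls := by
  rw [Bool.eq_iff_iff]
  simp only [List.contains_eq_mem, decide_eq_true_iff, List.mem_map, List.mem_filter]
  constructor
  · rintro ⟨p, ⟨hp, hq⟩, h1⟩; exact ⟨p, ⟨hp, (h p h1) ▸ hq⟩, h1⟩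
  · rintro ⟨p, ⟨hp, hr⟩, h1⟩; exact ⟨p, ⟨hp, (h p h1) ▸ hr⟩, h1⟩

lemma icl_set_contains (xs : List String) (c : String) :
    PySem.Set.contains (PySem.Set.ofList xs) c = xs.contains c := by
  rw [Bool.eq_iff_iff]
  simp only [PySem.Set.contains, List.contains_eq_mem, decide_eq_true_iff, PySem.Set.mem_ofList]

-- ===== VERDICT (by name: the statement is the Claim_ definition above) =====
theorem infer_candidate_labels_spec : Claim_equal_infer_candidate_labels := by
  intro dns_queries tls_snis http_hosts target_classes class_keywords _ hpre
  unfold Spec_infer_candidate_labels infer_candidate_labels infer_candidate_labels_alt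
  rw [PySem.List.foldl_append_if_eq_filter
    (p := fun cls => ((PySem.Dict.mk class_keywords).getD cls []).any
      (fun kw => PySem.Str.isIn (PySem.Str.lower kw) (icl_haystack dns_queries tls_snis http_hosts)))]
  rw [List.nil_append]
  apply List.filter_congr
  intro cls hcls
  rw [icl_key _ _ _ hpre, icl_set_contains,
    icl_filter_key_congr
      (q := fun p => PySem.Set.contains (PySem.Set.ofList target_classes) p.1 &&
        p.2.any (fun kw => PySem.Str.isIn (PySem.Str.lower kw) (icl_haystack dns_queries tls_snis http_hosts)))
      (r := fun p => p.2.any (fun kw => PySem.Str.isIn (PySem.Str.lower kw) (icl_haystack dns_queries tls_snis http_hosts)))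
      _ cls (by
        intro p hp
        have : PySem.Set.contains (PySem.Set.ofList target_classes) p.1 = true := by
          rw [icl_set_contains, List.contains_eq_mem, decide_eq_true_iff]; exact hp ▸ hcls
        simp only [this, Bool.true_and])]
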